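-- pv_equiv track=rewrite | github.com/plh00004/LogAnalyzer | dependencias/parseador.py | definirPerfiles
-- ===== SOURCE A (Python) =====
-- def definirPerfiles(cadena):
--
--     perfiles = dict()
--
--     for linea in cadena.split("\n"):
--         ip = linea.split(' - ')[0]
--         if ip not in perfiles.keys():
--             perfiles[ip] = list()
--         perfiles[ip].append(linea)
--
--     return perfiles
-- ===== SOURCE B (Python) =====
-- def definirPerfiles(cadena):
--     lineas = cadena.split("\n")
--     claves = [linea.split(' - ')[0] for linea in lineas]
--     vistos = list(dict.fromkeys(claves))
--     return {k: [l for l, c in zip(lineas, claves) if c == k] for k in vistos}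
-- ===== Notes on version B (the rewrite author's own statement) =====
-- stated objective: alternative
-- what changed: B replaces A's single scan with a dict-membership test per line by a two-phase plan: compute every line's key, dedup the keys in first-occurrence order, then build each group by filtering the key/line pairs per distinct key.
import Mathlib
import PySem

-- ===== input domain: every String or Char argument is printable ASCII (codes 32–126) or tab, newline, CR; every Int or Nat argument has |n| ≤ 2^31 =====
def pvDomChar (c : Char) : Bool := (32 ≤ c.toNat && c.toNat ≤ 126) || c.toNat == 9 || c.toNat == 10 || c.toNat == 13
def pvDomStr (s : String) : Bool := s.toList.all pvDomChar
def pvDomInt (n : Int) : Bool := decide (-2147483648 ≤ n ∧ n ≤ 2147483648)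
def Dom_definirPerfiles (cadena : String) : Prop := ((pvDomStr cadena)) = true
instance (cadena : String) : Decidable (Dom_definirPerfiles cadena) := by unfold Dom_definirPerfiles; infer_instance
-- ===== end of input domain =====

-- B groups lines by IP prefix via dedup-then-filter-per-key instead of A's single scan with a dict membership test; alternative decomposition, same result.

-- ===== PORT A =====
-- A: one pass; for each line take its ' - ' prefix, create the bucket if absent, append the line.
-- (split with a nonempty separator never returns an empty list, so `[0]` is `.headD ""` here.)
def definirPerfiles (cadena : String) : List (String × List String) :=
  (((PySem.Str.split? cadena "\n").getD []).foldl
    (fun d linea =>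
      let ip := ((PySem.Str.split? linea " - ").getD []).headD ""
      let d' := if d.contains ip then d else d.insert ip ([] : List String)
      d'.insert ip (d'.getD ip [] ++ [linea]))
    (PySem.Dict.empty : PySem.Dict String (List String))).items

-- ===== PORT B =====
-- B: compute all keys, dedup them in first-occurrence order, then filter the key/line pairs per key.
def definirPerfiles_alt (cadena : String) : List (String × List String) :=
  let lineas := (PySem.Str.split? cadena "\n").getD []
  let claves := lineas.map (fun linea => ((PySem.Str.split? linea " - ").getD []).headD "")
  let vistos := PySem.List.dedup claves
  vistos.map (fun k => (k, ((lineas.zip claves).filter (fun p => p.2 == k)).map (·.1)))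

-- ===== PRECONDITION & SPEC =====
def Spec_definirPerfiles (cadena : String) (out : List (String × List String)) : Prop := out = definirPerfiles_alt cadena
instance (cadena : String) (out : List (String × List String)) : Decidable (Spec_definirPerfiles cadena out) := by unfold Spec_definirPerfiles; infer_instance

-- ===== CLAIM (what is proved, stated in full; the proofs are below) =====
def Claim_equal_definirPerfiles : Prop := ∀ (cadena : String), Dom_definirPerfiles cadena → Spec_definirPerfiles cadena (definirPerfiles cadena)

-- ===== LEMMAS AND PROOFS =====

-- A's compound step (create-if-absent, then append) is one overwrite-insert.
lemma pv_step_eq (d : PySem.Dict String (List String)) (ip l : String) :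
    (let d' := if d.contains ip then d else d.insert ip ([] : List String)
     d'.insert ip (d'.getD ip [] ++ [l])) = d.insert ip (d.getD ip [] ++ [l]) := by
  by_cases h : d.contains ip
  · simp [h]
  · have hg : d.getD ip [] = [] := PySem.Dict.getD_of_not_contains d [] (by simpa using h)
    simp [h, hg, PySem.Dict.getD_insert_self, PySem.Dict.insert_insert_self]

-- Value of each bucket after the insert-append loop.
lemma pv_getD_loop (key : String → String) (ls : List String) :
    ∀ (d : PySem.Dict String (List String)) (c : String),
    (ls.foldl (fun d x => d.insert (key x) (d.getD (key x) [] ++ [x])) d).getD c []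
      = d.getD c [] ++ ls.filter (fun x => key x == c) := by
  induction ls with
  | nil => simp
  | cons x xs ih =>
    intro d c
    rw [List.foldl_cons, ih, PySem.Dict.getD_insert]
    by_cases h : c = key x
    · subst h
      rw [if_pos rfl, List.filter_cons_of_pos (by simp), List.append_assoc,
          List.singleton_append]
    · rw [if_neg h, List.filter_cons_of_neg (by simpa using Ne.symm h)]

-- ===== VERDICT (by name: the statement is the Claim_ definition above) =====
theorem definirPerfiles_spec : Claim_equal_definirPerfiles := by
  intro cadena _
  unfold Spec_definirPerfiles definirPerfiles definirPerfiles_alt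
  set ls := (PySem.Str.split? cadena "\n").getD [] with hls
  set key : String → String := fun linea => ((PySem.Str.split? linea " - ").getD []).headD "" with hkey
  have hstep : (fun (d : PySem.Dict String (List String)) linea =>
      let ip := ((PySem.Str.split? linea " - ").getD []).headD ""
      let d' := if d.contains ip then d else d.insert ip ([] : List String)
      d'.insert ip (d'.getD ip [] ++ [linea]))
      = fun d x => d.insert (key x) (d.getD (key x) [] ++ [x]) := by
    funext d x; exact pv_step_eq d (key x) x
  rw [hstep]
  have hnd : (ls.foldl (fun d x => d.insert (key x) (d.getD (key x) [] ++ [x]))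
      (PySem.Dict.empty : PySem.Dict String (List String))).keys.Nodup :=
    PySem.Dict.nodup_keys_foldl_insert_key ls key _ _ (by simp)
  rw [PySem.Dict.items_eq_map_keys _ hnd []]
  rw [PySem.Dict.keys_foldl_insert_key]
  have hzip : ls.zip (ls.map key) = ls.map (fun x => (x, key x)) := by
    clear hls; induction ls with
    | nil => rfl
    | cons a t iht => simp [iht]
  apply List.map_congr_left
  intro k hk
  refine Prod.ext rfl ?_
  rw [pv_getD_loop key ls PySem.Dict.empty k]
  simp [hzip, List.filter_map, Function.comp_def]
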